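-- pv_equiv track=rewrite | github.com/Alcoholkills/Just-Tell-Me-Jr | util.py | formatedString
-- ===== SOURCE A (Python) =====
-- def formatedString(string: str, space: int = 25, endString: str = "|") -> str:
--     if len(string) > space:
--         mess: str = ""
--         messList: list[str] = string.split()
--         tempList: list[str] = [""]
--         index = 0
--         for i, x in enumerate(messList):
--             if len(x) > space:
--                 if len(x[: len(x) // 2]) < space:
--                     messList[i : i + 1] = (x[: len(x) // 2] + "-", x[len(x) // 2 :])
--                 else:
--                     messList[i : i + 1] = (x[: space - 1] + "-", x[space - 1 :])
--         else:
--             for x in messList: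
--                 count: int = len(x) + len(tempList[index])
--                 if count > space:
--                     count = len(x)
--                     index += 1
--                     tempList.append(f" {x}")
--                 else:
--                     tempList[index] += f" {x}"
--         for line in tempList:
--             mess += f"|{line[1:]:^{space}}{endString}\n"
--     else:
--         mess = "|{m:^{num}}{end}\n".format(m=string, end=endString, num=space)
--     return mess
-- ===== SOURCE B (Python) =====
-- def formatedString(string: str, space: int = 25, endString: str = "|") -> str:
--     if len(string) <= space:
--         return "|" + f"{string:^{space}}" + endString + "\n"
--     # phase 1: flat list of pieces (long words chopped with a trailing '-')
--     pieces = []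
--     for word in string.split():
--         while len(word) > space:
--             half = len(word) // 2
--             cut = half if half < space else space - 1
--             pieces.append(word[:cut] + "-")
--             word = word[cut:]
--         pieces.append(word)
--     # phase 2: greedy packing, tracking the line width as sum(len(piece)+1)
--     done = []
--     cur = []
--     used = 0
--     for p in pieces:
--         if used + len(p) > space:
--             done.append(cur)
--             cur = [p]
--             used = len(p) + 1
--         else:
--             cur.append(p)
--             used += len(p) + 1
--     done.append(cur)
--     # phase 3: emit
--     out = []
--     for line in done:
--         out.append("|" + f"{' '.join(line):^{space}}" + endString + "\n")
--     return "".join(out)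
-- ===== Notes on version B (the rewrite author's own statement) =====
-- stated objective: simpler
-- what changed: Replaces A's enumerate-while-mutating slice-assignment word-chopper and its tempList/index string accumulation with three plain phases: a per-word while loop producing a flat piece list, a greedy packer tracking the line width numerically as sum(len(piece)+1), and a join-and-center emitter.
import Mathlib
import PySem

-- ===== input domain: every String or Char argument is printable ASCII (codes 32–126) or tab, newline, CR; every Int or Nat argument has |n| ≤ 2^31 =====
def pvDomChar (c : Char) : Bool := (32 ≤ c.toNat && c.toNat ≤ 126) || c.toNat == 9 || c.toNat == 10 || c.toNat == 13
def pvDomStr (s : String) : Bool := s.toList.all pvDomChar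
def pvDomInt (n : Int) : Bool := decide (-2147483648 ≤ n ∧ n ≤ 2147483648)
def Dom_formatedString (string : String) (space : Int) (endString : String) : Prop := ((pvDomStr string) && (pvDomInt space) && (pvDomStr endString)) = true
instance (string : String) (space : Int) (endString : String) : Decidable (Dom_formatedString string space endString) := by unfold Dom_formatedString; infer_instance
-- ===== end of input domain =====

-- B re-decomposes A's wrap-and-border formatter into three plain phases (chop each word with
-- an inner while loop, pack pieces greedily by a numeric running width, emit centered lines);
-- objective: simpler.

-- Python's caret-centering format spec on an ASCII string: pad to width w, extra space on the right.
-- Shared helper: both Pythons center through the same format spec.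
def pyCenter (cs : List Char) (w : Nat) : List Char :=
  let pad := w - cs.length
  List.replicate (pad / 2) ' ' ++ cs ++ List.replicate (pad - pad / 2) ' '

-- ===== PORT A =====
-- messList[i : i + 1] = (p, q) — the slice assignment replacing one element by two
def fsA_replace (l : List (List Char)) (i : Nat) (two : List (List Char)) : List (List Char) :=
  l.take i ++ two ++ l.drop (i + 1)

-- A's 'for i, x in enumerate(messList)' while messList is mutated by the slice assignment:
-- the enumerate counter advances by 1 per iteration over the current list.  fuel only makes
-- the recursion total (the Python loops forever when space ≤ 1 meets a word longer than
-- space — outside Pre_); on Pre_ inputs the fuel supplied below is never exhausted.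
def fsA_chop (space : Int) : Nat → List (List Char) → Nat → List (List Char)
  | 0, l, _ => l
  | fuel + 1, l, i =>
    match PySem.List.pyGet? l (i : Int) with
    | none => l                                   -- enumerate exhausted
    | some x =>
      if (x.length : Int) > space then
        let half : Nat := x.length / 2            -- len(x)//2 on a nonnegative length
        let l' := if (half : Int) < space then
            fsA_replace l i [PySem.Chars.slice x none (some (half : Int)) ++ ['-'],
                             PySem.Chars.slice x (some (half : Int)) none]
          else
            fsA_replace l i [PySem.Chars.slice x none (some (space - 1)) ++ ['-'],
                             PySem.Chars.slice x (some (space - 1)) none]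
        fsA_chop space fuel l' (i + 1)
      else fsA_chop space fuel l (i + 1)

-- one step of A's packing loop; state = (tempList, index)  (the then-branch's re-assignment
-- 'count = len(x)' is dead in the Python and dropped)
def fsA_step (space : Int) (st : List (List Char) × Nat) (x : List Char) :
    List (List Char) × Nat :=
  let count : Int := (x.length : Int) + ((PySem.List.pyGetD st.1 (st.2 : Int) []).length : Int)
  if count > space then (st.1 ++ [' ' :: x], st.2 + 1)
  else (PySem.List.pySetD st.1 (st.2 : Int) (PySem.List.pyGetD st.1 (st.2 : Int) [] ++ ' ' :: x), st.2)

def formatedString (string : String) (space : Int) (endString : String) : String :=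
  let cs := string.toList
  if (cs.length : Int) > space then
    let messList := PySem.Chars.split₀ cs
    let messList := fsA_chop space ((messList.map (fun w => w.length + 1)).sum) messList 0
    let tempList := (messList.foldl (fsA_step space) ([[]], 0)).1
    String.ofList (tempList.foldl (fun mess line =>
      mess ++ ('|' :: pyCenter (PySem.Chars.slice line (some 1) none) space.toNat
           ++ endString.toList ++ ['\n'])) [])
  else
    String.ofList ('|' :: pyCenter cs space.toNat ++ endString.toList ++ ['\n'])

-- ===== PORT B =====
-- B's inner while loop chopping one word into pieces (fuel = totality only; w.length + 1
-- suffices on Pre_ inputs)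
def fsB_chopWord (space : Int) : Nat → List Char → List (List Char)
  | 0, w => [w]
  | fuel + 1, w =>
    if (w.length : Int) > space then
      let half : Nat := w.length / 2
      let cut : Int := if (half : Int) < space then (half : Int) else space - 1
      (PySem.Chars.slice w none (some cut) ++ ['-']) ::
        fsB_chopWord space fuel (PySem.Chars.slice w (some cut) none)
    else [w]

-- one step of B's packer; state = (done, cur, used) with used the running Σ (len piece + 1)
def fsB_step (space : Int) (st : List (List (List Char)) × List (List Char) × Int)
    (p : List Char) : List (List (List Char)) × List (List Char) × Int :=
  if st.2.2 + (p.length : Int) > space then (st.1 ++ [st.2.1], [p], (p.length : Int) + 1)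
  else (st.1, st.2.1 ++ [p], st.2.2 + (p.length : Int) + 1)

def formatedString_alt (string : String) (space : Int) (endString : String) : String :=
  let cs := string.toList
  if (cs.length : Int) ≤ space then
    String.ofList ('|' :: pyCenter cs space.toNat ++ endString.toList ++ ['\n'])
  else
    let pieces := (PySem.Chars.split₀ cs).flatMap (fun w => fsB_chopWord space (w.length + 1) w)
    let st := pieces.foldl (fsB_step space) ([], [], 0)
    let lines := st.1 ++ [st.2.1]
    String.ofList (lines.foldl (fun out line =>
      out ++ ('|' :: pyCenter (PySem.Chars.join [' '] line) space.toNat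
          ++ endString.toList ++ ['\n'])) [])

-- ===== PRECONDITION & SPEC =====
-- Pre_ excludes exactly the inputs on which the Python A does not return: space < 0 (the
-- centering format spec rejects a negative width with ValueError, or the chopper loops forever) and space ∈ {0,1}
-- with len(string) > space and a word longer than space (the chopper makes no progress and
-- A loops forever).
def Pre_formatedString (string : String) (space : Int) (endString : String) : Prop :=
  0 ≤ space ∧ (2 ≤ space ∨ (string.toList.length : Int) ≤ space ∨
    ∀ w ∈ PySem.Chars.split₀ string.toList, (w.length : Int) ≤ space)
instance (string : String) (space : Int) (endString : String) :
    Decidable (Pre_formatedString string space endString) := by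
  unfold Pre_formatedString; infer_instance

def pvWitness_formatedString : String × Int × String := ("hello extraordinary world", 6, "|")

def Spec_formatedString (string : String) (space : Int) (endString : String) (out : String) : Prop := out = formatedString_alt string space endString
instance (string : String) (space : Int) (endString : String) (out : String) : Decidable (Spec_formatedString string space endString out) := by unfold Spec_formatedString; infer_instance

-- ===== CLAIM (what is proved, stated in full; the proofs are below) =====
def Claim_equal_formatedString : Prop := ∀ (string : String) (space : Int) (endString : String), Dom_formatedString string space endString → Pre_formatedString string space endString → Spec_formatedString string space endString (formatedString string space endString)

-- ===== LEMMAS AND PROOFS =====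

-- the string A accumulates for one output line: the concatenation of " " + piece
def pvLineStr (line : List (List Char)) : List Char := line.flatMap (fun p => ' ' :: p)

lemma pvLineStr_append_singleton (line : List (List Char)) (p : List Char) :
    pvLineStr (line ++ [p]) = pvLineStr line ++ ' ' :: p := by
  simp [pvLineStr]

lemma join_eq_cons_lineStr (p : List Char) : ∀ ps,
    PySem.Chars.join [' '] (p :: ps) = p ++ pvLineStr ps := by
  intro ps
  induction ps generalizing p with
  | nil => simp [pvLineStr, PySem.Chars.join_singleton]
  | cons q qs ih =>
    rw [PySem.Chars.join_cons_cons, ih q]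
    simp [pvLineStr]

-- A's 'line[1:]' recovers B's ' '.join(line)
lemma tail_pvLineStr (line : List (List Char)) :
    (pvLineStr line).tail = PySem.Chars.join [' '] line := by
  cases line with
  | nil => simp [pvLineStr, PySem.Chars.join_nil]
  | cons p ps => rw [join_eq_cons_lineStr]; simp [pvLineStr]

lemma getD_append_singleton (l : List (List Char)) (y d : List Char) :
    (l ++ [y]).getD l.length d = y := by
  simp [List.getD]

lemma set_append_singleton (l : List (List Char)) (y v : List Char) :
    (l ++ [y]).set l.length v = l ++ [v] := by
  rw [List.set_append_right _ _ (le_refl _)]; simp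

-- A's packing loop simulates B's: tempList = the pvLineStr image of done ++ [cur],
-- index = done.length, and used = len(tempList[index])
lemma pack_eq (space : Int) : ∀ (pieces : List (List Char)) (done : List (List (List Char)))
    (cur : List (List Char)) (used : Int), used = ((pvLineStr cur).length : Int) →
    pieces.foldl (fsA_step space) (done.map pvLineStr ++ [pvLineStr cur], done.length)
      = (fun st => (st.1.map pvLineStr ++ [pvLineStr st.2.1], st.1.length))
          (pieces.foldl (fsB_step space) (done, cur, used)) := by
  intro pieces
  induction pieces with
  | nil => intro done cur used hu; rfl
  | cons p ps ih =>
    intro done cur used hu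
    have hmaplen : (done.map pvLineStr).length = done.length := by simp
    have hget : PySem.List.pyGetD (done.map pvLineStr ++ [pvLineStr cur]) (done.length : Int) []
        = pvLineStr cur := by
      rw [PySem.List.pyGetD_natCast, ← hmaplen, getD_append_singleton]
    by_cases h : used + (p.length : Int) > space
    · have hA : fsA_step space (done.map pvLineStr ++ [pvLineStr cur], done.length) p
          = ((done ++ [cur]).map pvLineStr ++ [pvLineStr [p]], (done ++ [cur]).length) := by
        simp only [fsA_step, hget]
        rw [if_pos (by omega)]
        simp [pvLineStr]
      have hB : fsB_step space (done, cur, used) p = (done ++ [cur], [p], (p.length : Int) + 1) := by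
        simp only [fsB_step]; rw [if_pos (by exact h)]
      rw [List.foldl_cons, List.foldl_cons, hA, hB]
      exact ih (done ++ [cur]) [p] _ (by simp [pvLineStr])
    · have hA : fsA_step space (done.map pvLineStr ++ [pvLineStr cur], done.length) p
          = (done.map pvLineStr ++ [pvLineStr (cur ++ [p])], done.length) := by
        simp only [fsA_step, hget]
        rw [if_neg (by omega)]
        rw [PySem.List.pySetD_natCast, ← hmaplen, set_append_singleton, pvLineStr_append_singleton]
      have hB : fsB_step space (done, cur, used) p
          = (done, cur ++ [p], used + (p.length : Int) + 1) := by
        simp only [fsB_step]; rw [if_neg (by exact h)]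
      rw [List.foldl_cons, List.foldl_cons, hA, hB]
      exact ih done (cur ++ [p]) _ (by rw [pvLineStr_append_singleton]; simp [hu]; ring)

-- when 2 ≤ space a chop strictly shortens the remaining chunk
lemma rem_lt (space : Int) (hs : 2 ≤ space) (w : List Char) (hw : space < (w.length : Int)) :
    (PySem.Chars.slice w (some (if ((w.length / 2 : Nat) : Int) < space then ((w.length / 2 : Nat) : Int) else space - 1)) none).length < w.length := by
  by_cases h : ((w.length / 2 : Nat) : Int) < space
  · rw [if_pos h]
    simp only [PySem.Chars.slice_eq_listSlice, PySem.List.slice_from_natCast]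
    have h3 : 3 ≤ w.length := by omega
    simp [List.length_drop]; omega
  · rw [if_neg h]
    rw [PySem.Chars.slice_eq_listSlice, PySem.List.slice_from w (by omega)]
    have h1 : 1 ≤ (space - 1).toNat := by omega
    have h3 : 3 ≤ w.length := by omega
    simp [List.length_drop]; omega

-- B's chopper ignores any surplus fuel (2 ≤ space: the loop always progresses)
lemma chopWord_fuel (space : Int) (hs : 2 ≤ space) : ∀ (f : Nat) (w : List Char),
    w.length < f → fsB_chopWord space f w = fsB_chopWord space (w.length + 1) w := by
  intro f
  induction f using Nat.strong_induction_on with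
  | _ f ih =>
    intro w hwf
    match f, hwf with
    | f' + 1, hwf =>
      by_cases hl : (w.length : Int) > space
      · have hr := rem_lt space hs w hl
        simp only [fsB_chopWord, if_pos hl]
        congr 1
        rw [ih f' (by omega) _ (by omega), ih w.length (by omega) _ (by omega)]
      · simp only [fsB_chopWord, if_neg hl]

lemma replace_append (pre rest : List (List Char)) (w p q : List Char) :
    fsA_replace (pre ++ w :: rest) pre.length [p, q] = pre ++ p :: q :: rest := by
  have h1 : (pre ++ w :: rest).take pre.length = pre := by
    simpa using List.take_left pre (w :: rest)
  have h2 : (pre ++ w :: rest).drop (pre.length + 1) = rest := by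
    simpa using List.drop_append (l₁ := pre) (l₂ := w :: rest) (i := 1)
  simp [fsA_replace, h1, h2]

-- A's enumerate-with-mutation loop = B's per-word chopper, flattened; Σ (len w + 1) fuel
-- covers every iteration on the admitted inputs
lemma chop_eq (space : Int) : ∀ (fuel : Nat) (pre suffix : List (List Char)),
    (2 ≤ space ∨ ∀ w ∈ suffix, (w.length : Int) ≤ space) →
    (suffix.map (fun w => w.length + 1)).sum ≤ fuel →
    fsA_chop space fuel (pre ++ suffix) pre.length
      = pre ++ suffix.flatMap (fun w => fsB_chopWord space (w.length + 1) w) := by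
  intro fuel
  induction fuel with
  | zero =>
    intro pre suffix hcond hfuel
    have : suffix = [] := by
      cases suffix with
      | nil => rfl
      | cons w rest => simp at hfuel
    subst this; simp [fsA_chop]
  | succ f ih =>
    intro pre suffix hcond hfuel
    cases suffix with
    | nil =>
      simp [fsA_chop]
    | cons w rest =>
      have hget : PySem.List.pyGet? (pre ++ w :: rest) ((pre.length : Nat) : Int) = some w :=
        PySem.List.pyGet?_append_length pre rest w
      by_cases hl : (w.length : Int) > space
      · have hs2 : 2 ≤ space := by
          rcases hcond with h | h
          · exact h
          · exact absurd (h w (by simp)) (by omega)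
        have hr := rem_lt space hs2 w hl
        set cut : Int := if ((w.length / 2 : Nat) : Int) < space then ((w.length / 2 : Nat) : Int) else space - 1 with hcut
        have hstep : fsA_chop space (f + 1) (pre ++ w :: rest) pre.length
            = fsA_chop space f (pre ++ (PySem.Chars.slice w none (some cut) ++ ['-'])
                :: PySem.Chars.slice w (some cut) none :: rest) (pre.length + 1) := by
          simp only [fsA_chop, hget, if_pos hl]
          by_cases hh : ((w.length / 2 : Nat) : Int) < space
          · rw [hcut, if_pos hh, if_pos hh, replace_append]
          · rw [hcut, if_neg hh, if_neg hh, replace_append]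
        rw [hstep]
        have hrec := ih (pre ++ [PySem.Chars.slice w none (some cut) ++ ['-']])
            (PySem.Chars.slice w (some cut) none :: rest) (Or.inl hs2)
            (by have hr' := hr; simp at hfuel hr' ⊢; omega)
        simp only [List.length_append, List.length_cons, List.length_nil] at hrec
        rw [show pre.length + 1 = pre.length + (0 + 1) by ring] at hrec
        have heq : pre ++ [PySem.Chars.slice w none (some cut) ++ ['-']]
            ++ (PySem.Chars.slice w (some cut) none :: rest)
            = pre ++ (PySem.Chars.slice w none (some cut) ++ ['-'])
                :: PySem.Chars.slice w (some cut) none :: rest := by simp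
        rw [heq] at hrec
        rw [hrec]
        have hunf : fsB_chopWord space (w.length + 1) w
            = (PySem.Chars.slice w none (some cut) ++ ['-'])
              :: fsB_chopWord space ((PySem.Chars.slice w (some cut) none).length + 1)
                   (PySem.Chars.slice w (some cut) none) := by
          conv_lhs => rw [fsB_chopWord]
          rw [if_pos hl]
          show (PySem.Chars.slice w none (some cut) ++ ['-'])
              :: fsB_chopWord space w.length (PySem.Chars.slice w (some cut) none) = _
          rw [chopWord_fuel space hs2 w.length _ hr]
        simp [hunf]
      · have hstep : fsA_chop space (f + 1) (pre ++ w :: rest) pre.length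
            = fsA_chop space f (pre ++ w :: rest) (pre.length + 1) := by
          simp only [fsA_chop, hget, if_neg hl]
        rw [hstep]
        have hrec := ih (pre ++ [w]) rest
            (by rcases hcond with h | h
                · exact Or.inl h
                · exact Or.inr (fun x hx => h x (by simp [hx])))
            (by simp at hfuel ⊢; omega)
        simp only [List.length_append, List.length_cons, List.length_nil] at hrec
        rw [show pre.length + 1 = pre.length + (0 + 1) by ring] at hrec
        rw [show pre ++ [w] ++ rest = pre ++ w :: rest by simp] at hrec
        rw [hrec]
        have hw1 : fsB_chopWord space (w.length + 1) w = [w] := by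
          rw [fsB_chopWord, if_neg hl]
        simp [hw1]

-- ===== VERDICT (by name: the statement is the Claim_ definition above) =====
theorem formatedString_spec : Claim_equal_formatedString := by
  intro string space endString _hdom hpre
  obtain ⟨h0, hcase⟩ := hpre
  unfold Spec_formatedString formatedString formatedString_alt
  by_cases hgt : (string.toList.length : Int) > space
  · rw [if_pos hgt, if_neg (by omega)]
    have hcond : 2 ≤ space ∨ ∀ w ∈ PySem.Chars.split₀ string.toList, (w.length : Int) ≤ space := by
      rcases hcase with h | h | h
      · exact Or.inl h
      · exact absurd h (by omega)
      · exact Or.inr h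
    dsimp only []
    have hchop := chop_eq space
        (((PySem.Chars.split₀ string.toList).map (fun w => w.length + 1)).sum)
        [] (PySem.Chars.split₀ string.toList) hcond (le_refl _)
    simp only [List.nil_append, List.length_nil] at hchop
    rw [hchop]
    have hpack := pack_eq space
        ((PySem.Chars.split₀ string.toList).flatMap (fun w => fsB_chopWord space (w.length + 1) w))
        [] [] 0 (by simp [pvLineStr])
    simp only [List.map_nil, List.nil_append, List.length_nil] at hpack
    have hz : (pvLineStr [] : List Char) = [] := by simp [pvLineStr]
    rw [hz] at hpack
    rw [hpack]
    dsimp only []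
    congr 1
    simp only [PySem.List.foldl_append_eq_flatMap]
    set st := ((PySem.Chars.split₀ string.toList).flatMap
        (fun w => fsB_chopWord space (w.length + 1) w)).foldl (fsB_step space) ([], [], 0) with hst
    have hlines : st.1.map pvLineStr ++ [pvLineStr st.2.1] = (st.1 ++ [st.2.1]).map pvLineStr := by
      simp
    rw [hlines, List.flatMap_map]
    simp only [List.nil_append]
    congr 1
    funext line
    have hslice : PySem.List.slice (pvLineStr line) (some 1) none
        = PySem.Chars.join [' '] line := by
      rw [PySem.List.slice_from_one, tail_pvLineStr]
    simp [hslice]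
  · rw [if_neg hgt, if_pos (by omega)]
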